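-- pv_equiv track=rewrite | github.com/Kotokou/NumericalMethod | ax=b/fonction.py | inf_triangular_matrice
-- ===== SOURCE A (Python) =====
-- def inf_triangular_matrice(matrice, N):
--     triangula_matrice = []
--     i = 0
--     while i < N:
--         j = 0
--         temp_tab = []
--         while j < N:
--             if j < i:
--                 temp_tab.append(matrice[i][j])
--                 j += 1
--             else:
--                 temp_tab.append(0)
--                 j += 1
--         triangula_matrice.append(temp_tab)
--         i += 1
--     return triangula_matrice
-- ===== SOURCE B (Python) =====
-- def inf_triangular_matrice(matrice, N):
--     # row 0 of a strictly-lower-triangular matrix is all zeros; each later row i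
--     # is the first i entries of the original row, padded with N-i zeros.
--     return [([0] * N if i == 0 else matrice[i][:i] + [0] * (N - i))
--             for i in range(N)]
-- ===== Notes on version B (the rewrite author's own statement) =====
-- stated objective: simpler
-- what changed: Replaces the nested while loops with a per-row slice-and-pad: row i is matrice[i][:i] + [0]*(N-i) (row 0 is just [0]*N, touching no input), removing the inner column loop and the j<i conditional.
import Mathlib
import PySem

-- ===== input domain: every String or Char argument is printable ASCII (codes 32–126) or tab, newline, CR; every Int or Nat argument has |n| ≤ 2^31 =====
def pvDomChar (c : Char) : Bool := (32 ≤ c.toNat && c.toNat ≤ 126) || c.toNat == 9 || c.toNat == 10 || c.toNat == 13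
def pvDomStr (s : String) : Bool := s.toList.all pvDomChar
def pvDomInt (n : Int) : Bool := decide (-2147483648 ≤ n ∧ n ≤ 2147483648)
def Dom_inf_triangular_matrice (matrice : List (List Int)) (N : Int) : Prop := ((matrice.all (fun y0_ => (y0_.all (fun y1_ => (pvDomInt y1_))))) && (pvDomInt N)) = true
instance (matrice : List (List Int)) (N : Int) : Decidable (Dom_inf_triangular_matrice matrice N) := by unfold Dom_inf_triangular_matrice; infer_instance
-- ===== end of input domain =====

-- B builds each row by slice-and-pad (matrice[i][:i] + [0]*(N-i); row 0 is [0]*N) instead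
-- of A's inner column loop with a j<i branch; objective: simpler.


-- ===== PORT A =====
def inf_triangular_matrice (matrice : List (List Int)) (N : Int) : List (List Int) :=
  (PySem.List.pyRange 0 N 1).foldl (fun triangula i =>
    triangula ++ [(PySem.List.pyRange 0 N 1).foldl (fun temp j =>
      if j < i then temp ++ [PySem.List.pyGetD (PySem.List.pyGetD matrice i []) j 0]
      else temp ++ [(0 : Int)]) []]) []

-- ===== PORT B =====
def inf_triangular_matrice_alt (matrice : List (List Int)) (N : Int) : List (List Int) :=
  (PySem.List.pyRange 0 N 1).map (fun i =>
    if i = 0 then List.replicate N.toNat (0 : Int)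
    else PySem.List.slice (PySem.List.pyGetD matrice i []) none (some i)
      ++ List.replicate (N - i).toNat (0 : Int))

-- ===== PRECONDITION & SPEC =====
-- Pre_ excludes exactly the inputs on which the Python A raises IndexError: some row
-- index i with 1 ≤ i < N where matrice has no row i or row i is shorter than i.
def Pre_inf_triangular_matrice (matrice : List (List Int)) (N : Int) : Prop :=
  N ≤ 1 ∨ (N ≤ (matrice.length : Int) ∧
    ∀ i ∈ List.range matrice.length, (i : Int) < N → i ≤ (matrice.getD i []).length)
instance (matrice : List (List Int)) (N : Int) : Decidable (Pre_inf_triangular_matrice matrice N) := by unfold Pre_inf_triangular_matrice; infer_instance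

def pvWitness_inf_triangular_matrice : List (List Int) × Int := ([[1, 2, 3], [4, 5, 6], [7, 8, 9]], 3)

def Spec_inf_triangular_matrice (matrice : List (List Int)) (N : Int) (out : List (List Int)) : Prop := out = inf_triangular_matrice_alt matrice N
instance (matrice : List (List Int)) (N : Int) (out : List (List Int)) : Decidable (Spec_inf_triangular_matrice matrice N out) := by unfold Spec_inf_triangular_matrice; infer_instance

-- ===== CLAIM (what is proved, stated in full; the proofs are below) =====
def Claim_equal_inf_triangular_matrice : Prop := ∀ (matrice : List (List Int)) (N : Int), Dom_inf_triangular_matrice matrice N → Pre_inf_triangular_matrice matrice N → Spec_inf_triangular_matrice matrice N (inf_triangular_matrice matrice N)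

-- ===== LEMMAS AND PROOFS =====

-- one row of A equals slice-and-pad of that row, given the row is long enough
lemma row_eq (row : List Int) (N i : Int) (h0 : 0 ≤ i) (hiN : i < N)
    (hlen : i.toNat ≤ row.length) :
    (PySem.List.pyRange 0 N 1).foldl (fun temp j =>
      if j < i then temp ++ [PySem.List.pyGetD row j 0]
      else temp ++ [(0 : Int)]) []
    = PySem.List.slice row none (some i) ++ List.replicate (N - i).toNat (0 : Int) := by
  rw [PySem.List.pyRange_one_append 0 i N h0 (le_of_lt hiN), List.foldl_append]
  have h1 : (PySem.List.pyRange 0 i 1).foldl (fun temp j =>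
      if j < i then temp ++ [PySem.List.pyGetD row j 0]
      else temp ++ [(0 : Int)]) [] = PySem.List.slice row none (some i) := by
    rw [PySem.List.foldl_congr_mem'
        (g := fun temp j => temp ++ [PySem.List.pyGetD row j 0])
        (h := by
          intro x hx acc
          have := (PySem.List.mem_pyRange_one.mp hx).2
          simp [this])]
    rw [PySem.List.foldl_append_singleton_eq_map, PySem.List.slice_to row h0]
    rw [PySem.List.pyRange_one]
    simp only [List.map_map, List.nil_append]
    apply List.ext_getElem
    · simp [hlen]
    · intro k h1 h2
      simp only [List.getElem_map, List.getElem_range, Function.comp_apply, List.getElem_take]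
      rw [show ((0 : Int) + (k : Int)) = ((k : Nat) : Int) by omega, PySem.List.pyGetD_natCast]
      have hk : k < row.length := by
        simp at h1; omega
      simp [List.getD_eq_getElem?_getD, hk]
  rw [h1]
  rw [PySem.List.foldl_congr_mem'
      (g := fun temp (_ : Int) => temp ++ [(0 : Int)])
      (h := by
        intro x hx acc
        have := (PySem.List.mem_pyRange_one.mp hx).1
        simp [show ¬ x < i by omega])]
  rw [PySem.List.foldl_append_singleton_eq_map]
  congr 1
  rw [List.map_const', PySem.List.length_pyRange_one]

-- ===== VERDICT (by name: the statement is the Claim_ definition above) =====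
theorem inf_triangular_matrice_spec : Claim_equal_inf_triangular_matrice := by
  intro matrice N _hdom hpre
  unfold Spec_inf_triangular_matrice inf_triangular_matrice inf_triangular_matrice_alt
  rw [PySem.List.foldl_append_singleton_eq_map, List.nil_append]
  apply List.map_congr_left
  intro i hi
  obtain ⟨h0, hiN⟩ := PySem.List.mem_pyRange_one.mp hi
  by_cases hz : i = 0
  · subst hz
    rw [row_eq _ _ _ le_rfl hiN (Nat.zero_le _)]
    rw [PySem.List.slice_to _ le_rfl]
    simp
  · rw [if_neg hz]
    apply row_eq _ _ _ h0 hiN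
    rcases hpre with h | ⟨hlen, h⟩
    · omega
    · have hi' : i.toNat ∈ List.range matrice.length := by
        rw [List.mem_range]; omega
      have := h i.toNat hi' (by omega)
      rw [PySem.List.pyGetD_of_nonneg _ _ h0]
      exact this
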